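-- pv_equiv track=rewrite | github.com/csprock/keras-NER | validation.py | sentence_metrics
-- ===== SOURCE A (Python) =====
-- def sentence_metrics(predicted, actual):
--     '''
--     Return number of true positives (tp) and actual positives(cp) in between
--     a predicted and target sentence.
--     '''
--     cp, tp = 0, 0
--     n = len(predicted)
--     start_ne = list()
--     for i, s in enumerate(actual):
--         if s[0] == 'B':
--             cp += 1
--             start_ne.append(i)
--
--
--     for start_i in start_ne:
--
--         i = start_i
--         while i < n and actual[i][0] in ['B','I']:
--
--             if actual[i][0] == predicted[i][0]:
--                 # found = True
--
--                 try:
--                     if actual[i].split('-')[1] == predicted[i].split('-')[1]: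
--                         found = True
--                     else:
--                         found = False
--                 except IndexError:
--                     found = False
--
--             else:
--                 found = False
--             i += 1
--
--
--         if found and i < n:   # if predicted entity is longer than actual entity
--             if actual[i][0] == predicted[i][0]:
--                 tp += 1
--         elif found:
--             tp += 1
--         else:
--             pass
--
--     return tp, cp
-- ===== SOURCE B (Python) =====
-- def sentence_metrics(predicted, actual):
--     '''
--     Return number of true positives (tp) and actual positives (cp) between
--     a predicted and target sentence.  Single left-to-right pass over the
--     maximal B/I runs of `actual` instead of re-walking each run once per
--     'B' tag it contains.
--     '''
--     n = len(predicted)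
--     cp = 0
--     tp = 0
--     run_b = 0        # number of 'B' tags in the currently open (in-range) run
--     matched = False  # full tag match at the previous in-range run position
--     for i, a in enumerate(actual):
--         h = a[:1]
--         if h == 'B':
--             cp += 1
--         if i < n:
--             if h == 'B' or h == 'I':
--                 if h == 'B':
--                     run_b += 1
--                 p = predicted[i]
--                 sa = a.split('-')
--                 sp = p.split('-')
--                 matched = (p[:1] == h and len(sa) > 1 and len(sp) > 1
--                            and sa[1] == sp[1])
--             else:
--                 # run closed before the end of predicted: the heads at the
--                 # closing position must also agree
--                 if matched and h == predicted[i][:1]: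
--                     tp += run_b
--                 run_b = 0
--                 matched = False
--     if matched:
--         tp += run_b
--     return tp, cp
-- ===== Notes on version B (the rewrite author's own statement) =====
-- stated objective: alternative
-- what changed: One left-to-right pass over the maximal B/I runs of actual, adding the run's B-count when the run closes, instead of re-walking the whole run once for every B tag it contains.
-- intended difference: On inputs where some entity of actual starts at or beyond len(predicted) and the last in-range entity of actual fully matches predicted at its final position, A's leftover loop variable 'found' counts each such out-of-range entity as a true positive; B counts them as 0, the intended value since predicted has no tags there. — e.g. on sentence_metrics(["B-a"], ["B-a", "B-a"]): A returns [2, 2], B returns [1, 2]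
-- outside the precondition, e.g. on sentence_metrics(['B-a', ''], ['B-b', 'O']): A returns (0, 1), B returns (0, 1)
import Mathlib
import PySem

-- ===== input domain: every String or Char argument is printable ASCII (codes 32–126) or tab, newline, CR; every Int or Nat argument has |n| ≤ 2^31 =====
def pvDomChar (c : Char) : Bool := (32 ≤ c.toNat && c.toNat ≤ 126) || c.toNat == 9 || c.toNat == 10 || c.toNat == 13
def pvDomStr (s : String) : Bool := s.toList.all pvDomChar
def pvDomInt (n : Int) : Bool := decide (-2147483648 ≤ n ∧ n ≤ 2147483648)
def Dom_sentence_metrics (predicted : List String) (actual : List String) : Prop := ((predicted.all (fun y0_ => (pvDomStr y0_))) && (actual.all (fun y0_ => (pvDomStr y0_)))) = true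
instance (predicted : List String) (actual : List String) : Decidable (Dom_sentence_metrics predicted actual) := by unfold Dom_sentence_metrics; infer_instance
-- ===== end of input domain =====

-- One honest line: B replaces A's per-'B'-tag re-walk of each B/I run by a single
-- left-to-right pass over the runs (a different algorithm, not measured faster);
-- A=B is proved outside D_ (A's leftover-'found' corner, where A ≠ B is also proved
-- everywhere), and A's raising inputs are outside Pre_.

-- ===== PORT A =====
-- s[0] as an Option Char (none = IndexError, such inputs are outside Pre_)
def pyHeadA (s : String) : Option Char := PySem.Str.pyGet? s 0

-- s.split('-')[1] as an Option (none = IndexError, caught by A's try/except)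
def splitSecondA (s : String) : Option String := ((PySem.Str.split? s "-").getD [])[1]?

-- the body that recomputes `found` at position i (list indexing totalized with
-- getD ""; exact under Pre_, where every index A reads is in range and nonempty)
def aFoundStep (predicted : List String) (actual : List String) (i : Nat) : Bool :=
  let a := actual.getD i ""
  let p := predicted.getD i ""
  if pyHeadA a = pyHeadA p then
    match splitSecondA a, splitSecondA p with
    | some x, some y => x == y
    | _, _ => false
  else false

-- the tag at index i of l starts with the character c (l[i][0] == c)
abbrev headIs (l : List String) (i : Nat) (c : Char) : Prop := pyHeadA (l.getD i "") = some c

-- the inner `while i < n and actual[i][0] in ['B','I']` loop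
def aWhile (predicted : List String) (actual : List String) (i : Nat) (found : Bool) : Nat × Bool :=
  if h : i < predicted.length ∧ (headIs actual i 'B' ∨ headIs actual i 'I') then
    aWhile predicted actual (i + 1) (aFoundStep predicted actual i)
  else (i, found)
termination_by predicted.length - i
decreasing_by have := h.1; omega

def sentence_metrics (predicted : List String) (actual : List String) : List Int :=
  -- first loop: cp and start_ne (enumerate indices are ≥ 0, stored as Nat)
  let init := (PySem.List.enumerate actual 0).foldl
    (fun (st : Int × List Nat) p =>
      if pyHeadA p.2 = some 'B' then (st.1 + 1, st.2 ++ [p.1.toNat]) else st) (0, [])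
  let cp := init.1
  -- second loop over start_ne, threading Python's leftover `found` (initially
  -- undefined in Python; NameError inputs are outside Pre_, false stands in)
  let res := init.2.foldl
    (fun (st : Bool × Int) s =>
      let r := aWhile predicted actual s st.1
      let i := r.1
      let found := r.2
      if found ∧ i < predicted.length then
        if pyHeadA (actual.getD i "") = pyHeadA (predicted.getD i "") then (found, st.2 + 1)
        else (found, st.2)
      else if found then (found, st.2 + 1)
      else (found, st.2)) (false, 0)
  [res.2, cp]

-- ===== PORT B =====
-- s[:1]
def headB (s : String) : String := PySem.Str.slice s none (some 1)

-- s.split('-')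
def splitB (s : String) : List String := (PySem.Str.split? s "-").getD []

-- loop body of Source B (state: cp, tp, run_b, matched)
def bStep (predicted : List String) (st : Int × Int × Int × Bool) (pr : Int × String) : Int × Int × Int × Bool :=
  let cp := st.1; let tp := st.2.1; let run_b := st.2.2.1; let matched := st.2.2.2
  let i := pr.1; let a := pr.2
  let h := headB a
  let cp' := if h == "B" then cp + 1 else cp
  if i < (predicted.length : Int) then
    if h == "B" || h == "I" then
      let run_b' := if h == "B" then run_b + 1 else run_b
      let p := predicted.getD i.toNat ""
      let sa := splitB a
      let sp := splitB p
      let matched' := (headB p == h && decide (1 < sa.length) && decide (1 < sp.length)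
                        && (sa.getD 1 "" == sp.getD 1 ""))
      (cp', tp, run_b', matched')
    else
      let tp' := if matched && (h == headB (predicted.getD i.toNat "")) then tp + run_b else tp
      (cp', tp', 0, false)
  else (cp', tp, run_b, matched)

def sentence_metrics_alt (predicted : List String) (actual : List String) : List Int :=
  let st := (PySem.List.enumerate actual 0).foldl (bStep predicted) (0, 0, 0, false)
  let tp' := if st.2.2.2 then st.2.1 + st.2.2.1 else st.2.1
  [tp', st.1]

-- ===== PRECONDITION & SPEC =====
-- input-inspection helpers for Pre_ (independent of both ports)
-- first character of the tag at position i (input inspection only)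
def tagChars (l : List String) (i : Nat) : List Char := (l[i]?.getD "").toList
def hd (l : List String) (i : Nat) : List Char := (tagChars l i).take 1
def isB (actual : List String) (i : Nat) : Prop := hd actual i = ['B']
def isBI (actual : List String) (i : Nat) : Prop := hd actual i = ['B'] ∨ hd actual i = ['I']

-- Pre_ excludes exactly A's crashes: an empty tag in actual (IndexError on s[0]); an
-- empty predicted tag at a position A scans, i.e. reachable from a 'B' through B/I tags
-- (over-approximated slightly: A skips the final read when `found` is already False —
-- see the cite in the claim); all entities of actual starting at index ≥ len(predicted)
-- (NameError: `found` never assigned); and, when actual is shorter than predicted, an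
-- entity of actual running to its very end (IndexError: the while reads actual[len(actual)]).
def Pre_sentence_metrics (predicted : List String) (actual : List String) : Prop :=
  (∀ s ∈ actual, s ≠ "") ∧
  (∀ j, j < actual.length → j < predicted.length →
     (∃ s, s ≤ j ∧ isB actual s ∧ ∀ t, t < j → s ≤ t → isBI actual t) →
     predicted.getD j "" ≠ "") ∧
  ((∃ i, i < actual.length ∧ isB actual i) →
     ∃ i, i < actual.length ∧ i < predicted.length ∧ isB actual i) ∧
  (actual.length < predicted.length →
     ¬ ∃ s, s < actual.length ∧ isB actual s ∧ ∀ t, t < actual.length → s ≤ t → isBI actual t)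
instance (predicted : List String) (actual : List String) : Decidable (Pre_sentence_metrics predicted actual) := by
  haveI : ∀ (l : List String) (i : Nat), Decidable (isB l i) := fun l i => by unfold isB; infer_instance
  haveI : ∀ (l : List String) (i : Nat), Decidable (isBI l i) := fun l i => by unfold isBI; infer_instance
  unfold Pre_sentence_metrics
  infer_instance

def pvWitness_sentence_metrics : List String × List String :=
  (["B-a", "I-a", "O"], ["B-a", "I-a", "O"])

-- D_ helpers (input inspection only): tag head is c; the dash-type of a tag; full tag
-- agreement at one position; the last in-range position of the B/I run starting at s;
-- the position of the last in-range 'B' tag.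
def hdc (c : Char) (s : String) : Bool := s.toList.head? == some c
def tTy (s : String) : Option (List Char) := (s.toList.splitOnP (· == '-'))[1]?
def key (s : String) : Option Char × Option (List Char) := (s.toList.head?, tTy s)
def fmAt (p a : List String) (k : Nat) : Bool :=
  key (a.getD k "") == key (p.getD k "") && (tTy (a.getD k "")).isSome
def rend (p a : List String) (s : Nat) : Nat :=
  s + (((a.take p.length).drop (s + 1)).takeWhile (hdc 'I')).length
def lastB (p a : List String) : Nat :=
  p.length - 1 - (a.take p.length).reverse.findIdx (hdc 'B')

-- On inputs where some entity of actual starts at or beyond len(predicted) and the last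
-- in-range entity of actual fully matches predicted at its final position, A's leftover
-- loop variable 'found' counts each such out-of-range entity as a true positive; B counts
-- them as 0, the intended value since predicted has no tags there.
def D_sentence_metrics (predicted : List String) (actual : List String) : Prop :=
  ((actual.drop predicted.length).any (hdc 'B') &&
   (actual.take predicted.length).any (hdc 'B') &&
   fmAt predicted actual (rend predicted actual (lastB predicted actual))) = true
instance (predicted : List String) (actual : List String) : Decidable (D_sentence_metrics predicted actual) := by
  unfold D_sentence_metrics; infer_instance

def Spec_sentence_metrics (predicted : List String) (actual : List String) (out : List Int) : Prop :=
  ¬ D_sentence_metrics predicted actual → out = sentence_metrics_alt predicted actual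
instance (predicted : List String) (actual : List String) (out : List Int) : Decidable (Spec_sentence_metrics predicted actual out) := by
  unfold Spec_sentence_metrics; infer_instance

def pvDiffWitness_sentence_metrics : List String × List String := (["B-a"], ["B-a", "B-a"])
def pvDiffWitnessOut_sentence_metrics : (List Int) × (List Int) := ([2, 2], [1, 2])

-- ===== CLAIM (what is proved, stated in full; the proofs are below) =====
def Claim_unchanged_sentence_metrics : Prop := ∀ (predicted : List String) (actual : List String), Dom_sentence_metrics predicted actual → Pre_sentence_metrics predicted actual → Spec_sentence_metrics predicted actual (sentence_metrics predicted actual)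
def Claim_changed_sentence_metrics : Prop := Dom_sentence_metrics (pvDiffWitness_sentence_metrics.1) (pvDiffWitness_sentence_metrics.2) ∧ Pre_sentence_metrics (pvDiffWitness_sentence_metrics.1) (pvDiffWitness_sentence_metrics.2) ∧ D_sentence_metrics (pvDiffWitness_sentence_metrics.1) (pvDiffWitness_sentence_metrics.2) ∧ sentence_metrics (pvDiffWitness_sentence_metrics.1) (pvDiffWitness_sentence_metrics.2) = pvDiffWitnessOut_sentence_metrics.1 ∧ sentence_metrics_alt (pvDiffWitness_sentence_metrics.1) (pvDiffWitness_sentence_metrics.2) = pvDiffWitnessOut_sentence_metrics.2 ∧ pvDiffWitnessOut_sentence_metrics.1 ≠ pvDiffWitnessOut_sentence_metrics.2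
def Claim_exact_sentence_metrics : Prop := ∀ (predicted : List String) (actual : List String), Dom_sentence_metrics predicted actual → Pre_sentence_metrics predicted actual → D_sentence_metrics predicted actual → sentence_metrics predicted actual ≠ sentence_metrics_alt predicted actual

-- ===== LEMMAS AND PROOFS =====

-- ---------- basic bridges ----------
theorem pyHeadA_head? (s : String) : pyHeadA s = s.toList.head? := by
  simp [pyHeadA, List.head?_eq_getElem?, PySem.List.pyGet?_zero]

theorem hd_eq (l : List String) (i : Nat) : hd l i = (l.getD i "").toList.take 1 := by
  unfold hd tagChars
  rw [List.getD_eq_getElem?_getD]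

theorem take1_eq_single_iff (l : List Char) (c : Char) : l.take 1 = [c] ↔ l.head? = some c := by
  cases l <;> simp

theorem splitOnP_ne_nil' (p : Char → Bool) (l : List Char) : l.splitOnP p ≠ [] := by
  induction l with
  | nil => simp [List.splitOnP_nil]
  | cons a tl ih =>
    rw [List.splitOnP_cons]
    split_ifs
    · simp
    · intro h
      rcases hl : tl.splitOnP p with _ | ⟨x, xs⟩
      · exact ih hl
      · rw [hl] at h; simp at h

theorem headI_cons_tail' (l : List (List Char)) (h : l ≠ []) : l.headI :: l.tail = l := by
  cases l with
  | nil => exact absurd rfl h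
  | cons a tl => rfl

theorem go_single (c : Char) :
    ∀ fuel (l cur : List Char) (acc : List (List Char)), l.length < fuel →
      PySem.Chars.splitOn.go [c] fuel l cur acc
        = acc.reverse ++ (cur.reverse ++ (l.splitOnP (fun x => x == c)).headI)
            :: (l.splitOnP (fun x => x == c)).tail := by
  intro fuel
  induction fuel with
  | zero => intro l cur acc h; omega
  | succ f ih =>
    intro l cur acc h
    cases l with
    | nil =>
      rw [PySem.Chars.splitOn.go]
      all_goals first
      | simp [List.splitOnP_nil]
      | omega
    | cons ch rest =>
      rw [PySem.Chars.splitOn.go]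
      have hpre : ([c].isPrefixOf (ch :: rest)) = (ch == c) := by
        by_cases hcc : ch = c
        · subst hcc; simp [List.isPrefixOf]
        · have h2 : ¬ c = ch := fun hh => hcc hh.symm
          simp [List.isPrefixOf, hcc, h2]
      rw [hpre, List.splitOnP_cons]
      simp only [List.length_cons] at h
      by_cases hc : (ch == c) = true
      · rw [if_pos hc, if_pos hc]
        have hdrop : List.drop ([c].length) (ch :: rest) = rest := by simp
        rw [hdrop, ih rest [] (cur.reverse :: acc) (by omega)]
        simp [headI_cons_tail' _ (splitOnP_ne_nil' (fun x => x == c) rest)]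
      · rw [if_neg hc, if_neg hc]
        rw [ih rest (ch :: cur) acc (by omega)]
        rcases hsp : rest.splitOnP (fun x => x == c) with _ | ⟨h', t'⟩
        · exact absurd hsp (splitOnP_ne_nil' _ _)
        · simp

theorem splitOn_single_eq (c : Char) (l : List Char) :
    PySem.Chars.splitOn l [c] = l.splitOnP (fun x => x == c) := by
  unfold PySem.Chars.splitOn
  rw [go_single c (l.length + 1) l [] [] (by omega)]
  simp [headI_cons_tail' _ (splitOnP_ne_nil' (fun x => x == c) l)]

theorem ofList_injective : Function.Injective String.ofList := by
  intro a b h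
  have := congrArg String.toList h
  simpa [String.toList_ofList] using this

theorem splitSecondA_tTy (s : String) : splitSecondA s = (tTy s).map String.ofList := by
  unfold tTy splitSecondA
  have hsep : ("-" : String).toList = ['-'] := by decide
  rw [show PySem.Str.split? s "-"
      = (PySem.Chars.split? s.toList ("-").toList).map (fun x => x.map String.ofList) from rfl]
  rw [hsep]
  rw [show PySem.Chars.split? s.toList ['-']
      = some (PySem.Chars.splitOn s.toList ['-']) from by simp [PySem.Chars.split?]]
  rw [splitOn_single_eq]
  simp

-- `found` recomputed at position k equals the full-tag-agreement predicate fmAt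
theorem aFoundStep_eq_fmAt (predicted actual : List String) (k : Nat) :
    aFoundStep predicted actual k = fmAt predicted actual k := by
  simp only [aFoundStep, fmAt, key, splitSecondA_tTy, ← pyHeadA_head?]
  by_cases hh : pyHeadA (actual.getD k "") = pyHeadA (predicted.getD k "")
  · rcases hx : tTy (actual.getD k "") with _ | x <;>
      rcases hy : tTy (predicted.getD k "") with _ | y <;>
      simp_all [ofList_injective.eq_iff]
  · simp_all

-- ---------- the run-end function and the while-loop characterization ----------
-- the loop guard of A's inner while
abbrev aCont (predicted actual : List String) (i : Nat) : Prop :=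
  i < predicted.length ∧ (headIs actual i 'B' ∨ headIs actual i 'I')

-- first index ≥ i where the guard fails (the run end)
def rE (predicted actual : List String) (i : Nat) : Nat :=
  if h : aCont predicted actual i then rE predicted actual (i + 1) else i
termination_by predicted.length - i
decreasing_by have := h.1; omega

theorem rE_of_not (predicted actual : List String) (i : Nat) (h : ¬ aCont predicted actual i) :
    rE predicted actual i = i := by
  rw [rE]; exact dif_neg h

theorem rE_of_cont (predicted actual : List String) (i : Nat) (h : aCont predicted actual i) :
    rE predicted actual i = rE predicted actual (i + 1) := by
  rw [rE]; exact dif_pos h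

theorem rE_lb_fuel (predicted actual : List String) :
    ∀ fuel i, predicted.length - i ≤ fuel → i ≤ rE predicted actual i := by
  intro fuel
  induction fuel with
  | zero =>
    intro i h
    rw [rE_of_not]
    intro hc; have := hc.1; omega
  | succ f ih =>
    intro i h
    by_cases hc : aCont predicted actual i
    · rw [rE_of_cont _ _ _ hc]
      have := hc.1
      exact le_trans (Nat.le_succ i) (ih (i + 1) (by omega))
    · rw [rE_of_not _ _ _ hc]

theorem rE_lb (predicted actual : List String) (i : Nat) : i ≤ rE predicted actual i :=
  rE_lb_fuel predicted actual (predicted.length - i) i le_rfl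

theorem rE_stop_fuel (predicted actual : List String) :
    ∀ fuel i, predicted.length - i ≤ fuel → ¬ aCont predicted actual (rE predicted actual i) := by
  intro fuel
  induction fuel with
  | zero =>
    intro i h
    have hni : ¬ aCont predicted actual i := by intro hc; have := hc.1; omega
    rw [rE_of_not _ _ _ hni]; exact hni
  | succ f ih =>
    intro i h
    by_cases hc : aCont predicted actual i
    · rw [rE_of_cont _ _ _ hc]; have := hc.1; exact ih (i + 1) (by omega)
    · rw [rE_of_not _ _ _ hc]; exact hc

theorem rE_stop (predicted actual : List String) (i : Nat) :
    ¬ aCont predicted actual (rE predicted actual i) :=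
  rE_stop_fuel predicted actual (predicted.length - i) i le_rfl

theorem rE_cont_fuel (predicted actual : List String) :
    ∀ fuel i, predicted.length - i ≤ fuel →
      ∀ t, i ≤ t → t < rE predicted actual i → aCont predicted actual t := by
  intro fuel
  induction fuel with
  | zero =>
    intro i h t hit htr
    have hni : ¬ aCont predicted actual i := by intro hc; have := hc.1; omega
    rw [rE_of_not _ _ _ hni] at htr; omega
  | succ f ih =>
    intro i h t hit htr
    by_cases hc : aCont predicted actual i
    · rcases Nat.eq_or_lt_of_le hit with rfl | hlt
      · exact hc
      · have := hc.1
        rw [rE_of_cont _ _ _ hc] at htr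
        exact ih (i + 1) (by omega) t hlt htr
    · rw [rE_of_not _ _ _ hc] at htr; omega

theorem rE_cont (predicted actual : List String) (i t : Nat) (hit : i ≤ t)
    (htr : t < rE predicted actual i) : aCont predicted actual t :=
  rE_cont_fuel predicted actual (predicted.length - i) i le_rfl t hit htr

theorem rE_le (predicted actual : List String) (i : Nat) (h : i ≤ predicted.length) :
    rE predicted actual i ≤ predicted.length := by
  by_contra hgt
  have : aCont predicted actual predicted.length :=
    rE_cont predicted actual i predicted.length h (by omega)
  exact absurd this.1 (lt_irrefl _)

theorem rE_eq_of (predicted actual : List String) :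
    ∀ fuel i e, e - i ≤ fuel → i ≤ e →
      (∀ t, i ≤ t → t < e → aCont predicted actual t) → ¬ aCont predicted actual e →
      rE predicted actual i = e := by
  intro fuel
  induction fuel with
  | zero =>
    intro i e h hie _ hne
    have : i = e := by omega
    subst this
    exact rE_of_not _ _ _ hne
  | succ f ih =>
    intro i e h hie hall hne
    rcases Nat.eq_or_lt_of_le hie with rfl | hlt
    · exact rE_of_not _ _ _ hne
    · have hc : aCont predicted actual i := hall i le_rfl hlt
      rw [rE_of_cont _ _ _ hc]
      exact ih (i + 1) e (by omega) (by omega) (fun t h1 h2 => hall t (by omega) h2) hne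

theorem rE_ge_of (predicted actual : List String) (i e : Nat) (hie : i ≤ e)
    (hall : ∀ t, i ≤ t → t < e → aCont predicted actual t) : e ≤ rE predicted actual i := by
  by_contra hlt
  have h1 : rE predicted actual i < e := by omega
  have h2 : i ≤ rE predicted actual i := rE_lb predicted actual i
  exact rE_stop predicted actual i (hall _ h2 h1)

-- the inner while loop computes the run end and the match flag at its last position
theorem aWhile_eq_fuel (predicted actual : List String) :
    ∀ fuel i f, predicted.length - i ≤ fuel →
      aWhile predicted actual i f =
        (rE predicted actual i,
          if aCont predicted actual i then aFoundStep predicted actual (rE predicted actual i - 1) else f) := by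
  intro fuel
  induction fuel with
  | zero =>
    intro i f h
    have hni : ¬ aCont predicted actual i := by intro hc; have := hc.1; omega
    rw [aWhile, dif_neg hni, rE_of_not _ _ _ hni, if_neg hni]
  | succ fl ih =>
    intro i f h
    by_cases hc : aCont predicted actual i
    · have h1 := hc.1
      rw [aWhile, dif_pos hc, ih (i + 1) _ (by omega), rE_of_cont _ _ _ hc, if_pos hc]
      by_cases hc2 : aCont predicted actual (i + 1)
      · rw [if_pos hc2]
      · rw [if_neg hc2, rE_of_not _ _ _ hc2]
        simp
    · rw [aWhile, dif_neg hc, rE_of_not _ _ _ hc, if_neg hc]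

theorem aWhile_eq (predicted actual : List String) (i : Nat) (f : Bool) :
    aWhile predicted actual i f =
      (rE predicted actual i,
        if aCont predicted actual i then aFoundStep predicted actual (rE predicted actual i - 1) else f) :=
  aWhile_eq_fuel predicted actual (predicted.length - i) i f le_rfl

-- ---------- rend equals the run end minus one ----------
-- on the last in-range run (no 'B' after s in range), walking the consecutive 'I'
-- tags after s reaches exactly the position before A's run end
theorem rend_plus_one_fuel (predicted actual : List String) (hnm : predicted.length ≤ actual.length) :
    ∀ fuel s, predicted.length - s ≤ fuel → s < predicted.length →
      (headIs actual s 'B' ∨ headIs actual s 'I') →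
      (∀ t, t < predicted.length → s < t → ¬ headIs actual t 'B') →
      rend predicted actual s + 1 = rE predicted actual s := by
  intro fuel
  induction fuel with
  | zero => intro s h hs _ _; omega
  | succ f ih =>
    intro s h hs hBI hmax
    have hcont : aCont predicted actual s := ⟨hs, hBI⟩
    have hrE : rE predicted actual s = rE predicted actual (s + 1) := rE_of_cont _ _ _ hcont
    have hlen_take : (actual.take predicted.length).length = predicted.length := by
      rw [List.length_take]; omega
    by_cases hnext : s + 1 < predicted.length ∧ headIs actual (s + 1) 'I'
    · have hsm : s + 1 < actual.length := by omega
      have hcons : (actual.take predicted.length).drop (s + 1)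
          = actual[s + 1] :: (actual.take predicted.length).drop (s + 1 + 1) := by
        rw [List.drop_eq_getElem_cons (by rw [hlen_take]; omega)]
        congr 1
        exact List.getElem_take
      have hq : hdc 'I' actual[s + 1] = true := by
        have := hnext.2
        rw [headIs, List.getD_eq_getElem _ _ hsm, pyHeadA_head?] at this
        simp [hdc, this]
      have hstep : rend predicted actual s = rend predicted actual (s + 1) := by
        unfold rend
        rw [hcons, List.takeWhile_cons, hq]
        simp
        omega
      rw [hstep, hrE]
      exact ih (s + 1) (by omega) hnext.1 (Or.inr hnext.2)
        (fun t h1 h2 => hmax t h1 (by omega))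
    · have hstop : ¬ aCont predicted actual (s + 1) := by
        intro hc
        rcases hc with ⟨h1, h2⟩
        rcases h2 with hB | hI
        · exact hmax (s + 1) h1 (by omega) hB
        · exact hnext ⟨h1, hI⟩
      have hzero : rend predicted actual s = s := by
        unfold rend
        by_cases hlt : s + 1 < predicted.length
        · have hsm : s + 1 < actual.length := by omega
          have hcons : (actual.take predicted.length).drop (s + 1)
              = actual[s + 1] :: (actual.take predicted.length).drop (s + 1 + 1) := by
            rw [List.drop_eq_getElem_cons (by rw [hlen_take]; omega)]
            congr 1
            exact List.getElem_take
          have hI : ¬ headIs actual (s + 1) 'I' := fun hI => hnext ⟨hlt, hI⟩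
          have hq : hdc 'I' actual[s + 1] = false := by
            rw [headIs, List.getD_eq_getElem _ _ hsm, pyHeadA_head?] at hI
            simpa [hdc] using hI
          rw [hcons, List.takeWhile_cons, hq]
          simp
        · have : (actual.take predicted.length).drop (s + 1) = [] := by
            apply List.drop_eq_nil_of_le
            rw [hlen_take]; omega
          rw [this]
          simp
      rw [hzero, hrE, rE_of_not _ _ _ hstop]

theorem rend_plus_one (predicted actual : List String) (hnm : predicted.length ≤ actual.length)
    (s : Nat) (hs : s < predicted.length)
    (hBI : headIs actual s 'B' ∨ headIs actual s 'I')
    (hmax : ∀ t, t < predicted.length → s < t → ¬ headIs actual t 'B') :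
    rend predicted actual s + 1 = rE predicted actual s :=
  rend_plus_one_fuel predicted actual hnm (predicted.length - s) s le_rfl hs hBI hmax

-- ---------- the start list of A's first loop ----------
def idxFrom : List String → Nat → List Nat
  | [], _ => []
  | a :: tl, s0 =>
      if pyHeadA a = some 'B' then s0 :: idxFrom tl (s0 + 1) else idxFrom tl (s0 + 1)

def sIdx (actual : List String) : List Nat :=
  (List.range actual.length).filter (fun k => pyHeadA (actual.getD k "") == some 'B')

theorem idxFrom_eq (actual : List String) :
    ∀ s0, idxFrom actual s0 =
      ((List.range actual.length).filter (fun k => pyHeadA (actual.getD k "") == some 'B')).map (s0 + ·) := by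
  induction actual with
  | nil => intro s0; simp [idxFrom]
  | cons a tl ih =>
    intro s0
    rw [idxFrom]
    have hr : List.range (tl.length + 1) = 0 :: (List.range tl.length).map Nat.succ :=
      List.range_succ_eq_map
    have hmap : ∀ (l : List Nat), (l.map Nat.succ).map (s0 + ·) = l.map ((s0 + 1) + ·) := by
      intro l; rw [List.map_map]; apply List.map_congr_left; intro x _; simp [Function.comp]; omega
    simp only [List.length_cons, hr]
    by_cases hB : pyHeadA a = some 'B'
    · rw [if_pos hB]
      simp [hB, List.filter_map, hmap, ih (s0 + 1)]
      exact (congrArg _ (List.filter_congr (fun k hk => by simp [Function.comp]))).symm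
    · rw [if_neg hB]
      simp [hB, List.filter_map, hmap, ih (s0 + 1)]
      exact (congrArg _ (List.filter_congr (fun k hk => by simp [Function.comp]))).symm

theorem idxFrom_zero (actual : List String) : idxFrom actual 0 = sIdx actual := by
  rw [idxFrom_eq actual 0, sIdx]
  apply List.map_id''
  intro x; omega

theorem mem_sIdx (actual : List String) (s : Nat) :
    s ∈ sIdx actual ↔ s < actual.length ∧ pyHeadA (actual.getD s "") = some 'B' := by
  simp [sIdx, List.mem_filter, List.mem_range]

theorem sIdx_sorted (actual : List String) : (sIdx actual).Pairwise (· < ·) :=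
  List.Pairwise.filter _ (List.pairwise_lt_range)

-- A's first loop computes (cp, start_ne) = (#B, sIdx)
theorem initA_fold (actual : List String) :
    ∀ (s0 : Nat) (c : Int) (l : List Nat),
      (PySem.List.enumerate actual (s0 : Int)).foldl
        (fun (st : Int × List Nat) p =>
          if pyHeadA p.2 = some 'B' then (st.1 + 1, st.2 ++ [p.1.toNat]) else st) (c, l)
      = (c + (idxFrom actual s0).length, l ++ idxFrom actual s0) := by
  induction actual with
  | nil => intro s0 c l; simp [PySem.List.enumerate_nil, idxFrom]
  | cons a tl ih =>
    intro s0 c l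
    rw [PySem.List.enumerate_cons, List.foldl_cons, idxFrom]
    have hcast : ((s0 : Int) + 1) = ((s0 + 1 : Nat) : Int) := by push_cast; ring
    by_cases hB : pyHeadA a = some 'B'
    · simp only [hB, reduceIte]
      rw [hcast, ih (s0 + 1) (c + 1) (l ++ [((s0 : Int)).toNat])]
      apply Prod.ext
      · simp only [List.length_cons]; push_cast; ring
      · simp [List.append_assoc]
    · simp only [hB, reduceIte]
      rw [hcast, ih (s0 + 1) c l]

-- A's second-loop body, named
def aStep (predicted actual : List String) (st : Bool × Int) (s : Nat) : Bool × Int :=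
  let r := aWhile predicted actual s st.1
  let i := r.1
  let found := r.2
  if found ∧ i < predicted.length then
    if pyHeadA (actual.getD i "") = pyHeadA (predicted.getD i "") then (found, st.2 + 1)
    else (found, st.2)
  else if found then (found, st.2 + 1)
  else (found, st.2)

theorem sentence_metrics_eq (predicted actual : List String) :
    sentence_metrics predicted actual =
      [((sIdx actual).foldl (aStep predicted actual) (false, 0)).2, ((sIdx actual).length : Int)] := by
  show [((((PySem.List.enumerate actual 0).foldl
      (fun (st : Int × List Nat) p => if pyHeadA p.2 = some 'B' then (st.1 + 1, st.2 ++ [p.1.toNat]) else st)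
      (0, [])).2).foldl (aStep predicted actual) (false, 0)).2,
      (((PySem.List.enumerate actual 0).foldl
      (fun (st : Int × List Nat) p => if pyHeadA p.2 = some 'B' then (st.1 + 1, st.2 ++ [p.1.toNat]) else st)
      (0, [])).1)] = _
  have h := initA_fold actual 0 0 []
  norm_num at h
  rw [h, idxFrom_zero]

-- per-start contribution (run end, match at its last position, head check on overrun)
def cAt (predicted actual : List String) (s : Nat) : Int :=
  if aFoundStep predicted actual (rE predicted actual s - 1) then
    (if rE predicted actual s < predicted.length then
       (if pyHeadA (actual.getD (rE predicted actual s) "") = pyHeadA (predicted.getD (rE predicted actual s) "") then 1 else 0)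
     else 1)
  else 0

theorem aStep_in (predicted actual : List String) (st : Bool × Int) (s : Nat)
    (hs : aCont predicted actual s) :
    aStep predicted actual st s =
      (aFoundStep predicted actual (rE predicted actual s - 1), st.2 + cAt predicted actual s) := by
  unfold aStep cAt
  rw [aWhile_eq, if_pos hs]
  by_cases hf : aFoundStep predicted actual (rE predicted actual s - 1) = true
  · by_cases h1 : rE predicted actual s < predicted.length
    · rw [if_pos ⟨hf, h1⟩, if_pos hf, if_pos h1]
      by_cases h2 : pyHeadA (actual.getD (rE predicted actual s) "") = pyHeadA (predicted.getD (rE predicted actual s) "")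
      · rw [if_pos h2, if_pos h2]
      · rw [if_neg h2, if_neg h2]; simp
    · rw [if_neg (fun hc => h1 hc.2), if_pos hf, if_pos hf, if_neg h1]
  · have hf' : aFoundStep predicted actual (rE predicted actual s - 1) = false := by
      simpa using hf
    rw [if_neg (fun hc => hf hc.1), if_neg hf, if_neg hf]
    simp

theorem aStep_out (predicted actual : List String) (st : Bool × Int) (s : Nat)
    (hs : ¬ aCont predicted actual s) (hn : ¬ s < predicted.length) :
    aStep predicted actual st s = (st.1, st.2 + if st.1 then 1 else 0) := by
  unfold aStep
  rw [aWhile_eq, if_neg hs, rE_of_not _ _ _ hs]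
  rw [if_neg (fun hc => hn hc.2)]
  by_cases hf : st.1 = true
  · rw [if_pos hf, if_pos hf]
  · rw [if_neg hf, if_neg hf]
    simp

theorem foldA_in (predicted actual : List String) :
    ∀ (L : List Nat), (∀ s ∈ L, aCont predicted actual s) →
      ∀ (f0 : Bool) (t0 : Int),
        L.foldl (aStep predicted actual) (f0, t0) =
          ((L.getLast?.map
              (fun s => aFoundStep predicted actual (rE predicted actual s - 1))).getD f0,
           t0 + (L.map (cAt predicted actual)).sum) := by
  intro L
  induction L with
  | nil => intro _ f0 t0; simp
  | cons s tl ih =>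
    intro hall f0 t0
    rw [List.foldl_cons, aStep_in predicted actual _ s (hall s (by simp))]
    rw [ih (fun t ht => hall t (by simp [ht])) _ _]
    rcases htl : tl.getLast? with _ | x
    · have htlnil : tl = [] := by rwa [List.getLast?_eq_none_iff] at htl
      subst htlnil
      simp [add_assoc]
    · have h2 : (s :: tl).getLast? = some x := by
        rcases tl with _ | ⟨b, tb⟩
        · simp at htl
        · rw [List.getLast?_cons_cons]; exact htl
      rw [h2]
      simp [add_assoc, add_comm, add_left_comm]

theorem foldA_out (predicted actual : List String) :
    ∀ (L : List Nat), (∀ s ∈ L, ¬ aCont predicted actual s ∧ ¬ s < predicted.length) →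
      ∀ (t0 : Int), L.foldl (aStep predicted actual) (false, t0) = (false, t0) := by
  intro L
  induction L with
  | nil => intro _ t0; simp
  | cons s tl ih =>
    intro hall t0
    rw [List.foldl_cons, aStep_out predicted actual _ s (hall s (by simp)).1 (hall s (by simp)).2]
    simp only [if_false, Bool.false_eq_true]
    rw [add_zero]
    exact ih (fun t ht => hall t (by simp [ht])) t0

-- with the threaded flag true, every out-of-range start adds one to tp
theorem foldA_out_true (predicted actual : List String) :
    ∀ (L : List Nat), (∀ s ∈ L, ¬ aCont predicted actual s ∧ ¬ s < predicted.length) →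
      ∀ (t0 : Int), L.foldl (aStep predicted actual) (true, t0) = (true, t0 + L.length) := by
  intro L
  induction L with
  | nil => intro _ t0; simp
  | cons s tl ih =>
    intro hall t0
    have h := aStep_out predicted actual (true, t0) s (hall s (by simp)).1 (hall s (by simp)).2
    norm_num at h
    rw [List.foldl_cons, h, ih (fun t ht => hall t (by simp [ht])) (t0 + 1)]
    simp only [List.length_cons, Prod.mk.injEq, true_and]
    push_cast
    ring

-- a sorted list splits at a monotone threshold
theorem sorted_split (n : Nat) :
    ∀ (l : List Nat), l.Pairwise (· < ·) →
      l = l.filter (fun s => decide (s < n)) ++ l.filter (fun s => ! decide (s < n)) := by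
  intro l
  induction l with
  | nil => simp
  | cons a tl ih =>
    intro hp
    have htl := (List.pairwise_cons.mp hp).2
    have hmem := (List.pairwise_cons.mp hp).1
    by_cases ha : a < n
    · simp only [List.filter_cons, ha, decide_true, Bool.not_true, if_pos]
      simp only [List.cons_append, List.cons.injEq, true_and]
      exact ih htl
    · have h1 : tl.filter (fun s => decide (s < n)) = [] := by
        apply List.filter_eq_nil_iff.mpr
        intro x hx
        simp only [decide_eq_true_eq]
        have := hmem x hx; omega
      have h2 : tl.filter (fun s => ! decide (s < n)) = tl := by
        apply List.filter_eq_self.mpr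
        intro x hx
        simp only [Bool.not_eq_eq_eq_not, Bool.not_true, decide_eq_false_iff_not]
        have := hmem x hx; omega
      simp only [List.filter_cons, ha, decide_false, Bool.not_false, h1, h2]
      simp

-- ---------- B-side bridges ----------
theorem beq_toList (s t : String) : (s == t) = decide (s.toList = t.toList) := by
  by_cases h : s = t
  · simp [h]
  · have h2 : s.toList ≠ t.toList := fun hh => h (String.toList_inj.mp hh)
    simp [h, h2]

theorem pyHeadA_getElem? (s : String) : pyHeadA s = s.toList[0]? := by
  simp [pyHeadA, PySem.List.pyGet?_zero]

theorem headB_toList (s : String) : (headB s).toList = s.toList.take 1 := by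
  simp [headB, PySem.Str.toList_slice]
  rw [show (1:Int) = ((1:Nat):Int) by rfl, PySem.List.slice_to_natCast]

theorem headB_beq_single (s : String) (c : Char) (cs : String) (hcs : cs.toList = [c]) :
    (headB s == cs) = (pyHeadA s == some c) := by
  rw [beq_toList, headB_toList, hcs, pyHeadA_getElem?]
  cases hl : s.toList with
  | nil => simp
  | cons d t => by_cases hdc : d = c <;> simp [hdc]

theorem headB_beq_headB (p a : String) :
    (headB p == headB a) = decide (pyHeadA p = pyHeadA a) := by
  rw [beq_toList, headB_toList, headB_toList, pyHeadA_getElem?, pyHeadA_getElem?]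
  cases hp : p.toList with
  | nil => cases ha : a.toList with
    | nil => simp
    | cons c t => simp
  | cons c t => cases ha : a.toList with
    | nil => simp
    | cons d u => simp

theorem splitB_second (s : String) : (splitB s)[1]? = splitSecondA s := rfl

theorem split_part_eq (a p : String) :
    (decide (1 < (splitB a).length) && (decide (1 < (splitB p).length)
      && ((splitB a).getD 1 "" == (splitB p).getD 1 "")))
    = (match splitSecondA a, splitSecondA p with
       | some x, some y => x == y
       | _, _ => false) := by
  rw [← splitB_second, ← splitB_second]
  rcases h1 : (splitB a)[1]? with _ | x <;> rcases h2 : (splitB p)[1]? with _ | y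
  · have : ¬ 1 < (splitB a).length := by
      intro hl; rw [List.getElem?_eq_getElem hl] at h1; exact absurd h1 (by simp)
    simp [this]
  · have : ¬ 1 < (splitB a).length := by
      intro hl; rw [List.getElem?_eq_getElem hl] at h1; exact absurd h1 (by simp)
    simp [this]
  · have : ¬ 1 < (splitB p).length := by
      intro hl; rw [List.getElem?_eq_getElem hl] at h2; exact absurd h2 (by simp)
    simp [this]
  · have ha : 1 < (splitB a).length := by
      by_contra hl
      rw [List.getElem?_eq_none (by omega)] at h1; exact absurd h1 (by simp)
    have hp : 1 < (splitB p).length := by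
      by_contra hl
      rw [List.getElem?_eq_none (by omega)] at h2; exact absurd h2 (by simp)
    have hga : (splitB a).getD 1 "" = x := by rw [List.getD_eq_getElem?_getD, h1]; rfl
    have hgp : (splitB p).getD 1 "" = y := by rw [List.getD_eq_getElem?_getD, h2]; rfl
    rw [List.getElem?_eq_getElem ha] at h1
    rw [List.getElem?_eq_getElem hp] at h2
    simp only [Option.some.injEq] at h1 h2
    simp [ha, hp, hga, hgp, h1, h2]

theorem bMatched_eq (predicted actual : List String) (k : Nat) (hk : k < actual.length)
    (hkn : k < predicted.length) :
    (headB (predicted.getD k "") == headB (actual.getD k "")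
      && decide (1 < (splitB (actual.getD k "")).length)
      && decide (1 < (splitB (predicted.getD k "")).length)
      && ((splitB (actual.getD k "")).getD 1 "" == (splitB (predicted.getD k "")).getD 1 ""))
    = aFoundStep predicted actual k := by
  unfold aFoundStep
  rw [headB_beq_headB]
  by_cases hh : pyHeadA (actual.getD k "") = pyHeadA (predicted.getD k "")
  · rw [if_pos hh]
    have hdec : decide (pyHeadA (predicted.getD k "") = pyHeadA (actual.getD k "")) = true :=
      decide_eq_true hh.symm
    rw [hdec, Bool.true_and, Bool.and_assoc, split_part_eq]
  · rw [if_neg hh]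
    have hdec : decide (pyHeadA (predicted.getD k "") = pyHeadA (actual.getD k "")) = false :=
      decide_eq_false (fun hh2 => hh hh2.symm)
    simp only [hdec, Bool.false_and]

-- ---------- B-side counters ----------
def isBb (actual : List String) (k : Nat) : Bool := pyHeadA (actual.getD k "") == some 'B'

def biP (actual : List String) (k : Nat) : Bool :=
  pyHeadA (actual.getD k "") == some 'B' || pyHeadA (actual.getD k "") == some 'I'

def openb (actual : List String) (s k : Nat) : Bool :=
  decide (∀ t, t < k → s ≤ t → biP actual t = true)

def cpC (actual : List String) (k : Nat) : Int :=
  (((List.range k).filter (fun s => isBb actual s)).length : Int)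

def rbC (actual : List String) (k : Nat) : Int :=
  (((List.range k).filter (fun s => isBb actual s && openb actual s k)).length : Int)

def tpS (predicted actual : List String) (k : Nat) : Int :=
  (((List.range k).filter
      (fun s => isBb actual s && decide (rE predicted actual s < k))).map (cAt predicted actual)).sum

def mB (predicted actual : List String) (k : Nat) : Bool :=
  decide (k ≠ 0) && biP actual (k - 1) && aFoundStep predicted actual (k - 1)

theorem isBb_biP (actual : List String) (k : Nat) (h : isBb actual k = true) : biP actual k = true := by
  unfold isBb at h; unfold biP; rw [h, Bool.true_or]

theorem aCont_iff (predicted actual : List String) (t : Nat) :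
    aCont predicted actual t ↔ (t < predicted.length ∧ biP actual t = true) := by
  unfold aCont biP
  constructor
  · rintro ⟨h1, h2⟩
    refine ⟨h1, ?_⟩
    rcases h2 with h | h
    · rw [beq_iff_eq.mpr h, Bool.true_or]
    · rw [beq_iff_eq.mpr h, Bool.or_true]
  · rintro ⟨h1, h2⟩
    refine ⟨h1, ?_⟩
    rcases Bool.or_eq_true_iff.mp h2 with h | h
    · exact Or.inl (beq_iff_eq.mp h)
    · exact Or.inr (beq_iff_eq.mp h)

-- one application of B's loop body at index k
theorem bStep_apply (predicted actual : List String) (k : Nat) (hk : k < actual.length)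
    (hkn : k < predicted.length) (cp tp rb : Int) (mm : Bool) :
    bStep predicted (cp, tp, rb, mm) ((k : Int), actual[k]) =
      (if isBb actual k then cp + 1 else cp,
       (if biP actual k then tp
        else (if mm && decide (pyHeadA (actual.getD k "") = pyHeadA (predicted.getD k "")) then tp + rb else tp)),
       (if biP actual k then (if isBb actual k then rb + 1 else rb) else 0),
       (if biP actual k then aFoundStep predicted actual k else false)) := by
  have hgd : actual.getD k "" = actual[k] := List.getD_eq_getElem _ _ hk
  unfold bStep
  simp only [Int.toNat_natCast]
  rw [if_pos (show (k : Int) < (predicted.length : Int) by exact_mod_cast hkn)]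
  rw [← hgd]
  rw [headB_beq_single _ 'B' "B" (by decide), headB_beq_single _ 'I' "I" (by decide)]
  by_cases hbi : biP actual k = true
  · have hbi' := hbi; unfold biP at hbi'
    rw [if_pos hbi']
    simp only [if_pos hbi, isBb, Prod.mk.injEq, true_and, and_true]
    exact ⟨by split_ifs <;> rfl, by split_ifs <;> rfl, bMatched_eq predicted actual k hk hkn⟩
  · have hbi' : (pyHeadA (actual.getD k "") == some 'B' || pyHeadA (actual.getD k "") == some 'I') = false := by
      unfold biP at hbi; simpa using hbi
    rw [if_neg (by rw [hbi']; simp)]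
    simp only [if_neg hbi, isBb, Prod.mk.injEq, true_and, and_true]
    rw [headB_beq_headB (actual.getD k "") (predicted.getD k "")]
    exact ⟨by split_ifs <;> rfl, by split_ifs <;> rfl⟩

-- ---------- sum helpers ----------
theorem sum_filter_map (p : Nat → Bool) (f : Nat → Int) :
    ∀ (l : List Nat), ((l.filter p).map f).sum = (l.map (fun s => if p s then f s else 0)).sum := by
  intro l
  induction l with
  | nil => simp
  | cons a tl ih =>
    by_cases h : p a = true
    · simp [h, ih]
    · simp [h, ih]

theorem sum_map_add (f g : Nat → Int) :
    ∀ (l : List Nat), (l.map (fun s => f s + g s)).sum = (l.map f).sum + (l.map g).sum := by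
  intro l
  induction l with
  | nil => simp
  | cons a tl ih => simp [ih]; ring

-- ---------- open-run bookkeeping ----------
theorem openb_succ (actual : List String) (s k : Nat) (hs : s ≤ k) :
    openb actual s (k + 1) = (openb actual s k && biP actual k) := by
  unfold openb
  rw [Bool.eq_iff_iff]
  simp only [Bool.and_eq_true, decide_eq_true_eq]
  constructor
  · intro h; exact ⟨fun t h1 h2 => h t (by omega) h2, h k (by omega) hs⟩
  · rintro ⟨h1, h2⟩ t ht hst
    rcases Nat.lt_succ_iff_lt_or_eq.mp ht with h | rfl
    · exact h1 t h hst
    · exact h2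

theorem openb_of_rE (predicted actual : List String) (s k : Nat)
    (hrE : rE predicted actual s = k) (hs : s ≤ k) :
    openb actual s k = true := by
  unfold openb
  rw [decide_eq_true_eq]
  intro t htk hst
  have hc : aCont predicted actual t := rE_cont predicted actual s t hst (by omega)
  exact ((aCont_iff predicted actual t).mp hc).2

theorem rE_of_openb (predicted actual : List String) (s k : Nat) (hkn : k < predicted.length)
    (hnb : ¬ biP actual k = true) (hob : openb actual s k = true) (hs : s ≤ k) :
    rE predicted actual s = k := by
  unfold openb at hob
  rw [decide_eq_true_eq] at hob
  apply rE_eq_of predicted actual (k - s) s k (by omega) hs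
  · intro t h1 h2
    exact (aCont_iff predicted actual t).mpr ⟨by omega, hob t h2 h1⟩
  · intro hc
    exact hnb ((aCont_iff predicted actual k).mp hc).2

theorem rE_of_openb' (predicted actual : List String) (s k : Nat) (hk : k ≤ predicted.length)
    (hstop : ¬ aCont predicted actual k) (hob : openb actual s k = true) (hs : s ≤ k) :
    rE predicted actual s = k := by
  unfold openb at hob
  rw [decide_eq_true_eq] at hob
  apply rE_eq_of predicted actual (k - s) s k (by omega) hs
  · intro t h1 h2
    exact (aCont_iff predicted actual t).mpr ⟨by omega, hob t h2 h1⟩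
  · exact hstop

-- ---------- counter step lemmas ----------
theorem cpC_succ (actual : List String) (k : Nat) :
    cpC actual (k + 1) = (if isBb actual k then cpC actual k + 1 else cpC actual k) := by
  unfold cpC
  rw [List.range_succ, List.filter_append]
  by_cases h : isBb actual k = true
  · simp [h]
  · simp [h]

theorem rbC_succ_cont (actual : List String) (k : Nat) (hbi : biP actual k = true) :
    rbC actual (k + 1) =
      (if isBb actual k then rbC actual k + 1 else rbC actual k) := by
  unfold rbC
  rw [List.range_succ, List.filter_append]
  have hcong : (List.range k).filter (fun s => isBb actual s && openb actual s (k + 1))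
      = (List.range k).filter (fun s => isBb actual s && openb actual s k) := by
    apply List.filter_congr
    intro s hs
    rw [List.mem_range] at hs
    rw [openb_succ actual s k (by omega), hbi, Bool.and_true]
  rw [hcong]
  have hk1 : openb actual k (k + 1) = true := by
    rw [openb_succ actual k k le_rfl, hbi, Bool.and_true]
    unfold openb
    rw [decide_eq_true_eq]
    intro t h1 h2; omega
  by_cases h : isBb actual k = true
  · simp [h, hk1]
  · simp [h]

theorem rbC_succ_close (actual : List String) (k : Nat) (hbi : ¬ biP actual k = true) :
    rbC actual (k + 1) = 0 := by
  unfold rbC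
  have : (List.range (k + 1)).filter (fun s => isBb actual s && openb actual s (k + 1)) = [] := by
    apply List.filter_eq_nil_iff.mpr
    intro s hs
    rw [List.mem_range] at hs
    rw [openb_succ actual s k (by omega)]
    rcases h : biP actual k
    · simp
    · exact absurd h hbi
  rw [this]
  simp

theorem mB_succ (predicted actual : List String) (k : Nat) :
    mB predicted actual (k + 1) = (biP actual k && aFoundStep predicted actual k) := by
  unfold mB
  simp

theorem tpS_succ_cont (predicted actual : List String) (k : Nat) (hkn : k < predicted.length)
    (hbi : biP actual k = true) :
    tpS predicted actual (k + 1) = tpS predicted actual k := by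
  unfold tpS
  rw [List.range_succ, List.filter_append]
  have hck : aCont predicted actual k := (aCont_iff predicted actual k).mpr ⟨hkn, hbi⟩
  have hlast : (List.filter (fun s => isBb actual s && decide (rE predicted actual s < k + 1)) [k]) = [] := by
    simp only [List.filter_cons, List.filter_nil]
    have : rE predicted actual k = rE predicted actual (k + 1) := rE_of_cont _ _ _ hck
    have hge : k + 1 ≤ rE predicted actual k := by
      rw [this]; exact rE_lb predicted actual (k + 1)
    have hdec : decide (rE predicted actual k < k + 1) = false := by simp; omega
    simp [hdec]
    exact fun _ => by omega
  rw [hlast, List.append_nil]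
  have hcong : (List.range k).filter (fun s => isBb actual s && decide (rE predicted actual s < k + 1))
      = (List.range k).filter (fun s => isBb actual s && decide (rE predicted actual s < k)) := by
    apply List.filter_congr
    intro s hs
    have hne : rE predicted actual s ≠ k := by
      intro he
      exact (rE_stop predicted actual s) (he ▸ hck)
    have : decide (rE predicted actual s < k + 1) = decide (rE predicted actual s < k) := by
      rcases h : decide (rE predicted actual s < k)
      · simp at h ⊢; omega
      · simp at h ⊢; omega
    rw [this]
  rw [hcong]

theorem tpS_succ_close (predicted actual : List String) (k : Nat) (hkn : k < predicted.length)
    (hbi : ¬ biP actual k = true) :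
    tpS predicted actual (k + 1) = tpS predicted actual k +
      (if mB predicted actual k && decide (pyHeadA (actual.getD k "") = pyHeadA (predicted.getD k ""))
       then rbC actual k else 0) := by
  have hb : isBb actual k = false := by
    rcases h : isBb actual k
    · rfl
    · exact absurd (isBb_biP actual k h) hbi
  unfold tpS
  rw [List.range_succ, List.filter_append]
  have hlast : (List.filter (fun s => isBb actual s && decide (rE predicted actual s < k + 1)) [k]) = [] := by
    simp [hb]
  rw [hlast, List.append_nil]
  rw [sum_filter_map]
  have hpoint : ∀ s ∈ List.range k,
      (if isBb actual s && decide (rE predicted actual s < k + 1) then cAt predicted actual s else 0)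
        = (if isBb actual s && decide (rE predicted actual s < k) then cAt predicted actual s else 0)
          + (if isBb actual s && openb actual s k then
               (if aFoundStep predicted actual (k - 1)
                   && decide (pyHeadA (actual.getD k "") = pyHeadA (predicted.getD k ""))
                then (1 : Int) else 0) else 0) := by
    intro s hs
    rw [List.mem_range] at hs
    rcases hBs : isBb actual s with _ | _
    · simp [hBs]
    · simp only [hBs, Bool.true_and]
      rcases Nat.lt_trichotomy (rE predicted actual s) k with hlt | heq | hgt
      · have h3 : openb actual s k = false := by
          rcases h : openb actual s k
          · rfl
          · exact absurd (rE_of_openb predicted actual s k hkn hbi h (by omega)) (by omega)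
        rw [h3]
        rw [if_pos (by simp; omega), if_pos (by simp; omega)]
        simp
      · have h3 : openb actual s k = true := openb_of_rE predicted actual s k heq (by omega)
        rw [h3]
        rw [if_pos (by simp; omega), if_neg (by simp; omega), if_pos rfl, zero_add]
        unfold cAt
        rw [heq, if_pos hkn]
        by_cases hf : aFoundStep predicted actual (k - 1) = true
        · rw [if_pos hf]
          by_cases hh : pyHeadA (actual.getD k "") = pyHeadA (predicted.getD k "")
          · rw [if_pos hh, if_pos (by rw [hf, decide_eq_true hh]; rfl)]
          · have hdf : decide (pyHeadA (actual.getD k "") = pyHeadA (predicted.getD k "")) = false :=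
              decide_eq_false hh
            rw [if_neg hh, hdf, Bool.and_false]
            simp
        · have hf' : aFoundStep predicted actual (k - 1) = false := by simpa using hf
          rw [hf', Bool.false_and]
          simp
      · have h3 : openb actual s k = false := by
          rcases h : openb actual s k
          · rfl
          · exact absurd (rE_of_openb predicted actual s k hkn hbi h (by omega)) (by omega)
        rw [h3]
        rw [if_neg (by simp; omega), if_neg (by simp; omega)]
        simp
  rw [List.map_congr_left hpoint, sum_map_add, ← sum_filter_map, ← sum_filter_map]
  have hsecond : (((List.range k).filter (fun s => isBb actual s && openb actual s k)).map
      (fun _ => (if aFoundStep predicted actual (k - 1)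
                   && decide (pyHeadA (actual.getD k "") = pyHeadA (predicted.getD k ""))
                then (1 : Int) else 0))).sum
      = (if aFoundStep predicted actual (k - 1)
            && decide (pyHeadA (actual.getD k "") = pyHeadA (predicted.getD k ""))
         then (1 : Int) else 0) * rbC actual k := by
    rw [List.map_const', List.sum_replicate, nsmul_eq_mul]
    unfold rbC; ring
  rw [hsecond]
  by_cases hrb : rbC actual k = 0
  · rw [hrb]
    simp
  · have hex : ∃ s, s ∈ (List.range k).filter (fun s => isBb actual s && openb actual s k) := by
      rcases hl : (List.range k).filter (fun s => isBb actual s && openb actual s k) with _ | ⟨x, xs⟩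
      · exfalso; apply hrb; unfold rbC; rw [hl]; rfl
      · exact ⟨x, by simp [hl]⟩
    rcases hex with ⟨s, hsmem⟩
    have hsp := List.mem_filter.mp hsmem
    have hs_lt : s < k := List.mem_range.mp hsp.1
    have hopen : openb actual s k = true := by
      have h2 := hsp.2
      simp only [Bool.and_eq_true] at h2
      exact h2.2
    have hbik : biP actual (k - 1) = true := by
      unfold openb at hopen
      rw [decide_eq_true_eq] at hopen
      exact hopen (k - 1) (by omega) (by omega)
    have hmB : mB predicted actual k = aFoundStep predicted actual (k - 1) := by
      unfold mB
      rw [hbik]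
      simp [show k ≠ 0 by omega]
    rw [hmB]
    by_cases hcond : (aFoundStep predicted actual (k - 1)
        && decide (pyHeadA (actual.getD k "") = pyHeadA (predicted.getD k ""))) = true
    · rw [if_pos hcond, if_pos hcond]; ring
    · rw [if_neg hcond, if_neg hcond]; ring

-- ---------- Prop/Bool bridges for Pre_ ----------
theorem hd_eq_single_iff (l : List String) (i : Nat) (c : Char) :
    hd l i = [c] ↔ pyHeadA (l.getD i "") = some c := by
  rw [hd_eq, take1_eq_single_iff, pyHeadA_head?]

theorem isB_iff_head (actual : List String) (i : Nat) :
    isB actual i ↔ pyHeadA (actual.getD i "") = some 'B' := by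
  unfold isB
  rw [hd_eq_single_iff]

theorem isBI_iff_head (actual : List String) (i : Nat) :
    isBI actual i ↔ (pyHeadA (actual.getD i "") = some 'B' ∨ pyHeadA (actual.getD i "") = some 'I') := by
  unfold isBI
  rw [hd_eq_single_iff, hd_eq_single_iff]

theorem isB_iff_isBb (actual : List String) (i : Nat) :
    isB actual i ↔ isBb actual i = true := by
  rw [isB_iff_head]
  unfold isBb
  simp

theorem isBI_iff_biP (actual : List String) (i : Nat) :
    isBI actual i ↔ biP actual i = true := by
  rw [isBI_iff_head]
  unfold biP
  simp

-- ---------- extremal elements of sorted lists ----------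
theorem last_max : ∀ (l : List Nat), l.Pairwise (· < ·) →
    ∀ x, l.getLast? = some x → ∀ y ∈ l, y ≤ x := by
  intro l
  induction l with
  | nil => intro _ x hx; simp at hx
  | cons a tl ih =>
    intro hp x hx y hy
    rcases htl : tl with _ | ⟨b, tb⟩
    · subst htl
      simp at hx hy
      omega
    · subst htl
      have h2 : (b :: tb).getLast? = some x := by
        rw [List.getLast?_cons_cons] at hx
        exact hx
      have hxmem : x ∈ b :: tb := List.mem_of_getLast? h2
      rcases List.mem_cons.mp hy with rfl | hmem
      · have hax := (List.pairwise_cons.mp hp).1 x hxmem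
        omega
      · exact ih (List.pairwise_cons.mp hp).2 x h2 y hmem

theorem max_last : ∀ (l : List Nat), l.Pairwise (· < ·) →
    ∀ x ∈ l, (∀ y ∈ l, y ≤ x) → l.getLast? = some x := by
  intro l
  induction l with
  | nil => intro _ x hx; simp at hx
  | cons a tl ih =>
    intro hp x hx hmax
    rcases htl : tl with _ | ⟨b, tb⟩
    · subst htl
      simp at hx
      simp [hx]
    · subst htl
      rw [List.getLast?_cons_cons]
      have hxtl : x ∈ b :: tb := by
        rcases List.mem_cons.mp hx with rfl | hmem
        · exfalso
          have hb : x < b := (List.pairwise_cons.mp hp).1 b (by simp)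
          have := hmax b (by simp)
          omega
        · exact hmem
      exact ih (List.pairwise_cons.mp hp).2 x hxtl (fun y hy => hmax y (by simp [hy]))

-- ---------- D_ components from A's loop state and back ----------
-- an out-of-range 'B' start as an index, from and to the `any` form
theorem anyB_intro (predicted actual : List String) (x : Nat) (hx : x < actual.length)
    (hxn : predicted.length ≤ x) (hB : pyHeadA (actual.getD x "") = some 'B') :
    (actual.drop predicted.length).any (hdc 'B') = true := by
  apply List.any_eq_true.mpr
  refine ⟨actual[x], ?_, ?_⟩
  · apply List.mem_of_getElem? (i := x - predicted.length)
    rw [List.getElem?_drop]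
    have : predicted.length + (x - predicted.length) = x := by omega
    rw [this]
    exact List.getElem?_eq_getElem hx
  · rw [List.getD_eq_getElem _ _ hx] at hB
    simp [hdc, ← pyHeadA_head?, hB]

theorem anyB_elim (predicted actual : List String)
    (h : (actual.drop predicted.length).any (hdc 'B') = true) :
    ∃ x, x < actual.length ∧ predicted.length ≤ x ∧ pyHeadA (actual.getD x "") = some 'B' := by
  rcases List.any_eq_true.mp h with ⟨y, hy, hq⟩
  rcases List.getElem_of_mem hy with ⟨i, hi, rfl⟩
  rw [List.length_drop] at hi
  refine ⟨predicted.length + i, by omega, by omega, ?_⟩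
  rw [List.getD_eq_getElem _ _ (show predicted.length + i < actual.length by omega), pyHeadA_head?]
  rw [List.getElem_drop] at hq
  simpa [hdc] using hq

-- an in-range 'B' start gives the take-side `any` clause of D_
theorem anyTakeB_intro (predicted actual : List String) (s : Nat) (hsn : s < predicted.length)
    (hsm : s < actual.length) (hB : pyHeadA (actual.getD s "") = some 'B') :
    (actual.take predicted.length).any (hdc 'B') = true := by
  apply List.any_eq_true.mpr
  refine ⟨actual[s], ?_, ?_⟩
  · apply List.mem_of_getElem? (i := s)
    rw [List.getElem?_take_of_lt hsn]
    exact List.getElem?_eq_getElem hsm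
  · rw [List.getD_eq_getElem _ _ hsm, pyHeadA_head?] at hB
    simp [hdc, hB]

-- last index satisfying p, located through findIdx on the reversed list
theorem revFind_lt {α : Type} (L : List α) (p : α → Bool) (hex : ∃ x ∈ L, p x) :
    L.reverse.findIdx p < L.length := by
  have hex' : ∃ x ∈ L.reverse, p x := by
    rcases hex with ⟨y, hy, hq⟩; exact ⟨y, List.mem_reverse.mpr hy, hq⟩
  have := List.findIdx_lt_length_of_exists hex'
  rwa [List.length_reverse] at this

theorem revFind_hit {α : Type} (L : List α) (p : α → Bool) (hex : ∃ x ∈ L, p x) :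
    p (L[L.length - 1 - L.reverse.findIdx p]'(by have := revFind_lt L p hex; omega)) = true := by
  have hr := revFind_lt L p hex
  have h1 : p (L.reverse[L.reverse.findIdx p]'(by rw [List.length_reverse]; omega)) = true :=
    List.findIdx_getElem
  simpa [List.getElem_reverse] using h1

theorem revFind_max {α : Type} (L : List α) (p : α → Bool) (hex : ∃ x ∈ L, p x) :
    ∀ t, (ht : t < L.length) → L.length - 1 - L.reverse.findIdx p < t → p (L[t]'ht) = false := by
  intro t ht hgt
  have hr := revFind_lt L p hex
  have hi : L.length - 1 - t < L.reverse.findIdx p := by omega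
  have h2 := List.not_of_lt_findIdx (p := p) (xs := L.reverse) hi
  simp only [List.getElem_reverse] at h2
  have hidx : L.length - 1 - (L.length - 1 - t) = t := by omega
  simpa only [hidx] using h2

-- when some in-range tag is a 'B', lastB is the position of the last one
theorem lastB_spec (predicted actual : List String) (hnm : predicted.length ≤ actual.length)
    (hany : (actual.take predicted.length).any (hdc 'B') = true) :
    lastB predicted actual < predicted.length ∧
    pyHeadA (actual.getD (lastB predicted actual) "") = some 'B' ∧
    (∀ t, t < predicted.length → lastB predicted actual < t → ¬ headIs actual t 'B') := by
  have hlen : (actual.take predicted.length).length = predicted.length := by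
    rw [List.length_take]; omega
  have hex : ∃ x ∈ actual.take predicted.length, hdc 'B' x = true := List.any_eq_true.mp hany
  have hr := revFind_lt (actual.take predicted.length) (hdc 'B') hex
  have hr' : (actual.take predicted.length).reverse.findIdx (hdc 'B') < predicted.length :=
    lt_of_lt_of_eq hr hlen
  have hsn : lastB predicted actual < predicted.length := by
    simp only [lastB]; omega
  have hsm : lastB predicted actual < actual.length := by omega
  refine ⟨hsn, ?_, ?_⟩
  · have hhit := revFind_hit (actual.take predicted.length) (hdc 'B') hex
    simp only [hlen, List.getElem_take] at hhit
    rw [List.getD_eq_getElem _ _ hsm, pyHeadA_head?]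
    simp only [lastB]
    simpa [hdc] using hhit
  · intro t ht hst hBt
    have ht' : t < (actual.take predicted.length).length := by rw [hlen]; omega
    simp only [lastB] at hst
    have hmx := revFind_max (actual.take predicted.length) (hdc 'B') hex t ht'
      (by rw [hlen]; exact hst)
    simp only [List.getElem_take] at hmx
    simp only [headIs] at hBt
    rw [List.getD_eq_getElem _ _ (show t < actual.length by omega), pyHeadA_head?] at hBt
    simp [hdc, hBt] at hmx

-- ---------- A-side total ----------
-- A's tp equals the sum of per-start contributions over in-range starts
theorem A_tp_eq (predicted actual : List String)
    (hPre3 : (∃ i, i < actual.length ∧ isB actual i) →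
       ∃ i, i < actual.length ∧ i < predicted.length ∧ isB actual i)
    (hnD : ¬ D_sentence_metrics predicted actual) :
    ((sIdx actual).foldl (aStep predicted actual) (false, 0)).2
      = ((((sIdx actual).filter (fun s => decide (s < predicted.length))).map
          (cAt predicted actual)).sum) := by
  have hsplit := sorted_split predicted.length (sIdx actual) (sIdx_sorted actual)
  have hin : ∀ s ∈ (sIdx actual).filter (fun s => decide (s < predicted.length)),
      aCont predicted actual s := by
    intro s hs
    have h1 := List.mem_filter.mp hs
    have h2 := (mem_sIdx actual s).mp h1.1
    have h3 : s < predicted.length := by simpa using h1.2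
    refine (aCont_iff predicted actual s).mpr ⟨h3, ?_⟩
    apply isBb_biP
    unfold isBb
    rw [h2.2]
    decide
  have hout : ∀ s ∈ (sIdx actual).filter (fun s => ! decide (s < predicted.length)),
      ¬ aCont predicted actual s ∧ ¬ s < predicted.length := by
    intro s hs
    have h1 := List.mem_filter.mp hs
    have h3 : ¬ s < predicted.length := by simpa using h1.2
    exact ⟨fun hc => h3 hc.1, h3⟩
  conv_lhs => rw [hsplit]
  rw [List.foldl_append]
  rw [foldA_in predicted actual _ hin false 0]
  rcases hSout : (sIdx actual).filter (fun s => ! decide (s < predicted.length)) with _ | ⟨x, xs⟩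
  · simp
  · -- out-of-range starts exist; the threaded flag must be false (otherwise D_ holds)
    have hxmem : x ∈ (sIdx actual).filter (fun s => ! decide (s < predicted.length)) := by
      rw [hSout]; simp
    have hx1 := List.mem_filter.mp hxmem
    have hx2 := (mem_sIdx actual x).mp hx1.1
    have hxn : ¬ x < predicted.length := by simpa using hx1.2
    have hnm : predicted.length ≤ actual.length := by omega
    -- the in-range start list is nonempty
    have hSin_ne : (sIdx actual).filter (fun s => decide (s < predicted.length)) ≠ [] := by
      rcases hPre3 ⟨x, hx2.1, ((isB_iff_head actual x).mpr hx2.2)⟩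
        with ⟨i, him, hin', hiB⟩
      intro hnil
      have : i ∈ (sIdx actual).filter (fun s => decide (s < predicted.length)) := by
        rw [List.mem_filter]
        refine ⟨(mem_sIdx actual i).mpr ⟨him, ?_⟩, by simpa using hin'⟩
        exact (isB_iff_head actual i).mp hiB
      rw [hnil] at this
      simp at this
    rcases hlast : ((sIdx actual).filter (fun s => decide (s < predicted.length))).getLast?
      with _ | s0
    · exact absurd (List.getLast?_eq_none_iff.mp hlast) hSin_ne
    · simp only [Option.map_some, Option.getD_some]
      have hs0mem : s0 ∈ (sIdx actual).filter (fun s => decide (s < predicted.length)) :=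
        List.mem_of_getLast? hlast
      -- show the flag is false
      have hflag : aFoundStep predicted actual (rE predicted actual s0 - 1) = false := by
        rcases hfl : aFoundStep predicted actual (rE predicted actual s0 - 1) with _ | _
        · rfl
        · exfalso
          apply hnD
          have hs01 := List.mem_filter.mp hs0mem
          have hs02 := (mem_sIdx actual s0).mp hs01.1
          have hs0n : s0 < predicted.length := by simpa using hs01.2
          -- maximality: no in-range 'B' tag after s0
          have hmax : ∀ t, t < predicted.length → s0 < t → ¬ headIs actual t 'B' := by
            intro t htn hst hBt
            by_cases htm : t < actual.length
            · have : t ∈ (sIdx actual).filter (fun s => decide (s < predicted.length)) := by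
                rw [List.mem_filter]
                exact ⟨(mem_sIdx actual t).mpr ⟨htm, hBt⟩, by simpa using htn⟩
              have := last_max _ (List.Pairwise.filter _ (sIdx_sorted actual)) s0 hlast t this
              omega
            · simp only [headIs] at hBt
              rw [List.getD_eq_getElem?_getD, List.getElem?_eq_none (by omega)] at hBt
              exact absurd hBt (by decide)
          have hrr := rend_plus_one predicted actual hnm s0 hs0n
            (Or.inl hs02.2) hmax
          have hc2 := anyTakeB_intro predicted actual s0 hs0n hs02.1 hs02.2
          have hspec := lastB_spec predicted actual hnm hc2
          have hseq : lastB predicted actual = s0 := by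
            rcases Nat.lt_trichotomy (lastB predicted actual) s0 with hlt | heq | hgt
            · exact absurd hs02.2 (hspec.2.2 s0 hs0n hlt)
            · exact heq
            · exact absurd hspec.2.1 (hmax _ hspec.1 hgt)
          have h3 : fmAt predicted actual (rend predicted actual (lastB predicted actual)) = true := by
            rw [hseq, ← aFoundStep_eq_fmAt]
            have hrw : rend predicted actual s0 = rE predicted actual s0 - 1 := by omega
            rw [hrw]
            exact hfl
          unfold D_sentence_metrics
          rw [Bool.and_eq_true, Bool.and_eq_true]
          exact ⟨⟨anyB_intro predicted actual x hx2.1 (by omega) hx2.2, hc2⟩, h3⟩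
      rw [hflag]
      rw [foldA_out predicted actual (x :: xs)
        (fun s hs => hout s (by rw [hSout]; exact hs)) _]
      simp

-- ---------- the closed-form bridge between the two sides ----------
theorem sin_eq_range_min (predicted actual : List String) :
    ((sIdx actual).filter (fun s => decide (s < predicted.length)))
      = (List.range (min predicted.length actual.length)).filter (isBb actual) := by
  have hS : sIdx actual = (List.range actual.length).filter (isBb actual) := rfl
  rw [hS, List.filter_filter]
  rcases Nat.le_total actual.length predicted.length with hmn | hnm
  · rw [min_eq_right hmn]
    apply List.filter_congr
    intro s hs
    rw [List.mem_range] at hs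
    have : decide (s < predicted.length) = true := by simp; omega
    rw [this]
    simp
  · rw [min_eq_left hnm]
    have hsplitr : List.range actual.length
        = List.range predicted.length ++ (List.range (actual.length - predicted.length)).map
            (predicted.length + ·) := by
      rw [← List.range_add]
      congr 1
      omega
    rw [hsplitr, List.filter_append]
    have h1 : (List.range predicted.length).filter (fun s => decide (s < predicted.length) && isBb actual s)
        = (List.range predicted.length).filter (isBb actual) := by
      apply List.filter_congr
      intro s hs
      rw [List.mem_range] at hs
      have hd : decide (s < predicted.length) = true := by simp; omega
      rw [hd, Bool.true_and]
    have h2 : ((List.range (actual.length - predicted.length)).map (predicted.length + ·)).filter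
        (fun s => decide (s < predicted.length) && isBb actual s) = [] := by
      apply List.filter_eq_nil_iff.mpr
      intro s hsmem
      rcases List.mem_map.mp hsmem with ⟨x, hx, rfl⟩
      have hd : decide (predicted.length + x < predicted.length) = false := by simp
      rw [hd, Bool.false_and]
      simp
    rw [h1, h2, List.append_nil]

-- TOT = B's final tp formula
theorem TOT_eq (predicted actual : List String)
    (hPre4 : actual.length < predicted.length →
       ¬ ∃ s, s < actual.length ∧ isB actual s ∧ ∀ t, t < actual.length → s ≤ t → isBI actual t) :
    ((((sIdx actual).filter (fun s => decide (s < predicted.length))).map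
        (cAt predicted actual)).sum)
      = (if mB predicted actual (min predicted.length actual.length)
         then tpS predicted actual (min predicted.length actual.length)
              + rbC actual (min predicted.length actual.length)
         else tpS predicted actual (min predicted.length actual.length)) := by
  rw [sin_eq_range_min]
  rcases Nat.lt_or_ge actual.length predicted.length with hmlt | hnle
  · -- actual shorter than predicted: no run may reach the end of actual (Pre_),
    -- so every started run ends strictly inside and the open-run counter is empty
    rw [min_eq_right (by omega)]
    have hnoopen : ∀ s, s < actual.length → isBb actual s = true →
        rE predicted actual s < actual.length := by
      intro s hsm hsb
      by_contra hge
      apply hPre4 hmlt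
      refine ⟨s, hsm, (isB_iff_isBb actual s).mpr hsb, ?_⟩
      intro t htm hst
      have hc := rE_cont predicted actual s t hst (by omega)
      exact (isBI_iff_biP actual t).mpr ((aCont_iff predicted actual t).mp hc).2
    have hrb : rbC actual actual.length = 0 := by
      unfold rbC
      have : (List.range actual.length).filter
          (fun s => isBb actual s && openb actual s actual.length) = [] := by
        apply List.filter_eq_nil_iff.mpr
        intro s hsmem
        rw [List.mem_range] at hsmem
        rcases hb : isBb actual s with _ | _
        · simp
        · have hro : rE predicted actual s < actual.length := hnoopen s hsmem hb
          have : openb actual s actual.length = false := by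
            rcases ho : openb actual s actual.length with _ | _
            · rfl
            · exfalso
              unfold openb at ho
              rw [decide_eq_true_eq] at ho
              have hge : actual.length ≤ rE predicted actual s := by
                apply rE_ge_of predicted actual s actual.length (by omega)
                intro t h1 h2
                exact (aCont_iff predicted actual t).mpr ⟨by omega, ho t h2 h1⟩
              omega
          rw [this, Bool.and_false]
          simp
      rw [this]
      rfl
    have hfil : (List.range actual.length).filter (isBb actual)
        = (List.range actual.length).filter
            (fun s => isBb actual s && decide (rE predicted actual s < actual.length)) := by
      apply List.filter_congr
      intro s hs
      rw [List.mem_range] at hs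
      rcases hb : isBb actual s with _ | _
      · simp
      · have := hnoopen s hs hb
        have hd : decide (rE predicted actual s < actual.length) = true := by simp; omega
        rw [hd, Bool.and_true]
    rw [hrb, hfil]
    unfold tpS
    simp
  · -- predicted not longer: the cap is at predicted.length, open runs end exactly there
    rw [min_eq_left (by omega)]
    rw [sum_filter_map]
    have hpoint : ∀ s ∈ List.range predicted.length,
        (if isBb actual s then cAt predicted actual s else 0)
          = (if isBb actual s && decide (rE predicted actual s < predicted.length)
             then cAt predicted actual s else 0)
            + (if isBb actual s && openb actual s predicted.length then
                 (if aFoundStep predicted actual (predicted.length - 1) then (1 : Int) else 0)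
               else 0) := by
      intro s hs
      rw [List.mem_range] at hs
      by_cases hBs : isBb actual s = true
      · rw [hBs]
        simp only [Bool.true_and]
        have hle : rE predicted actual s ≤ predicted.length :=
          rE_le predicted actual s (by omega)
        have hstopn : ¬ aCont predicted actual predicted.length := fun hc => absurd hc.1 (by omega)
        rcases Nat.lt_or_ge (rE predicted actual s) predicted.length with hlt | hge
        · have h3 : openb actual s predicted.length = false := by
            rcases ho : openb actual s predicted.length with _ | _
            · rfl
            · exact absurd (rE_of_openb' predicted actual s predicted.length le_rfl hstopn ho
                (by omega)) (by omega)
          have hd : decide (rE predicted actual s < predicted.length) = true := by simp; omega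
          rw [hd, h3]
          simp
        · have heq : rE predicted actual s = predicted.length := by omega
          have h3 : openb actual s predicted.length = true :=
            openb_of_rE predicted actual s predicted.length heq (by omega)
          have hd : decide (rE predicted actual s < predicted.length) = false := by simp; omega
          rw [hd, h3]
          simp only [Bool.false_eq_true, if_false, if_true, if_pos rfl, zero_add]
          unfold cAt
          rw [heq]
          rw [if_neg (show ¬ predicted.length < predicted.length by omega)]
      · have hBf : isBb actual s = false := by simpa using hBs
        rw [hBf]
        simp
    rw [List.map_congr_left hpoint, sum_map_add, ← sum_filter_map, ← sum_filter_map]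
    have hsecond : (((List.range predicted.length).filter
          (fun s => isBb actual s && openb actual s predicted.length)).map
        (fun _ => (if aFoundStep predicted actual (predicted.length - 1) then (1 : Int) else 0))).sum
        = (if aFoundStep predicted actual (predicted.length - 1) then (1 : Int) else 0)
            * rbC actual predicted.length := by
      rw [List.map_const', List.sum_replicate, nsmul_eq_mul]
      unfold rbC
      ring
    rw [hsecond]
    by_cases hrb : rbC actual predicted.length = 0
    · rw [hrb]
      unfold tpS
      simp
    · have hex : ∃ s, s ∈ (List.range predicted.length).filter
          (fun s => isBb actual s && openb actual s predicted.length) := by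
        rcases hl : (List.range predicted.length).filter
            (fun s => isBb actual s && openb actual s predicted.length) with _ | ⟨x, xs⟩
        · exfalso; apply hrb; unfold rbC; rw [hl]; rfl
        · exact ⟨x, by simp [hl]⟩
      rcases hex with ⟨s, hsmem⟩
      have hsp := List.mem_filter.mp hsmem
      have hs_lt : s < predicted.length := List.mem_range.mp hsp.1
      have hopen : openb actual s predicted.length = true := by
        have h2 := hsp.2
        simp only [Bool.and_eq_true] at h2
        exact h2.2
      have hbik : biP actual (predicted.length - 1) = true := by
        unfold openb at hopen
        rw [decide_eq_true_eq] at hopen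
        exact hopen (predicted.length - 1) (by omega) (by omega)
      have hmB : mB predicted actual predicted.length
          = aFoundStep predicted actual (predicted.length - 1) := by
        unfold mB
        rw [hbik]
        simp [show predicted.length ≠ 0 by omega]
      rw [hmB]
      unfold tpS
      rcases hf : aFoundStep predicted actual (predicted.length - 1) with _ | _ <;> simp

-- ---------- B's fold: invariant and assembly ----------
theorem enum_take_succ (actual : List String) (k : Nat) (hk : k < actual.length) :
    (PySem.List.enumerate actual 0).take (k + 1)
      = (PySem.List.enumerate actual 0).take k ++ [((k : Int), actual[k])] := by
  rw [List.take_succ]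
  congr 1
  rw [PySem.List.getElem?_enumerate]
  simp [List.getElem?_eq_getElem hk]

theorem bInv (predicted actual : List String) :
    ∀ k, k ≤ actual.length → k ≤ predicted.length →
      ((PySem.List.enumerate actual 0).take k).foldl (bStep predicted) (0, 0, 0, false)
        = (cpC actual k, tpS predicted actual k, rbC actual k, mB predicted actual k) := by
  intro k
  induction k with
  | zero =>
    intro _ _
    simp [cpC, tpS, rbC, mB]
  | succ k ih =>
    intro hk hkn
    rw [enum_take_succ actual k (by omega), List.foldl_append, ih (by omega) (by omega)]
    simp only [List.foldl_cons, List.foldl_nil]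
    rw [bStep_apply predicted actual k (by omega) (by omega)]
    by_cases hbi : biP actual k = true
    · rw [if_pos hbi, if_pos hbi, if_pos hbi]
      rw [cpC_succ, rbC_succ_cont actual k hbi, tpS_succ_cont predicted actual k (by omega) hbi,
        mB_succ, hbi, Bool.true_and]
    · have hbif : biP actual k = false := by simpa using hbi
      rw [if_neg hbi, if_neg hbi, if_neg hbi]
      rw [cpC_succ, rbC_succ_close actual k hbi, tpS_succ_close predicted actual k (by omega) hbi,
        mB_succ, hbif, Bool.false_and]
      simp only [Prod.mk.injEq, true_and, and_true]
      split_ifs <;> simp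

theorem bStep_fst (predicted : List String) (st : Int × Int × Int × Bool) (pr : Int × String) :
    (bStep predicted st pr).1 = (if headB pr.2 == "B" then st.1 + 1 else st.1) := by
  obtain ⟨cp, tp, rb, mm⟩ := st
  obtain ⟨i, a⟩ := pr
  dsimp only [bStep]
  split_ifs <;> rfl

theorem bStep_snd_tail (predicted : List String) (st : Int × Int × Int × Bool) (pr : Int × String)
    (h : ¬ pr.1 < (predicted.length : Int)) :
    (bStep predicted st pr).2 = st.2 := by
  unfold bStep
  rw [if_neg h]

theorem cp_fold (predicted : List String) :
    ∀ (L : List (Int × String)) (st : Int × Int × Int × Bool),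
      (L.foldl (bStep predicted) st).1
        = st.1 + ((L.filter (fun p => headB p.2 == "B")).length : Int) := by
  intro L
  induction L with
  | nil => intro st; simp
  | cons p tl ih =>
    intro st
    rw [List.foldl_cons, ih]
    rw [List.filter_cons]
    rcases h : (headB p.2 == "B") with _ | _
    · rw [bStep_fst]
      rw [h]
      simp
    · rw [bStep_fst]
      rw [h]
      simp
      ring

theorem tail_fold (predicted : List String) :
    ∀ (L : List (Int × String)), (∀ p ∈ L, ¬ p.1 < (predicted.length : Int)) →
      ∀ st, (L.foldl (bStep predicted) st).2 = st.2 := by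
  intro L
  induction L with
  | nil => intro _ st; rfl
  | cons p tl ih =>
    intro hall st
    rw [List.foldl_cons, ih (fun q hq => hall q (by simp [hq]))]
    rw [bStep_snd_tail predicted st p (hall p (by simp))]

theorem enum_filter_B (actual : List String) :
    ∀ (s : Int), (((PySem.List.enumerate actual s).filter (fun p => headB p.2 == "B")).length : Int)
      = ((actual.filter (fun a => headB a == "B")).length : Int) := by
  induction actual with
  | nil => intro s; simp [PySem.List.enumerate_nil]
  | cons a tl ih =>
    intro s
    rw [PySem.List.enumerate_cons, List.filter_cons, List.filter_cons]
    rcases h : (headB a == "B") with _ | _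
    · simpa using ih (s + 1)
    · simp only [h]
      push_cast
      rw [List.length_cons, List.length_cons]
      push_cast
      have := ih (s + 1)
      omega

theorem filter_B_eq_cp (actual : List String) :
    ((actual.filter (fun a => headB a == "B")).length : Int)
      = ((sIdx actual).length : Int) := by
  have h1 : actual.filter (fun a => headB a == "B")
      = actual.filter (fun a => pyHeadA a == some 'B') := by
    apply List.filter_congr
    intro a _
    exact headB_beq_single a 'B' "B" (by decide)
  rw [h1, ← idxFrom_zero]
  have h2 : ∀ (l : List String) (s0 : Nat),
      (idxFrom l s0).length = (l.filter (fun a => pyHeadA a == some 'B')).length := by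
    intro l
    induction l with
    | nil => intro s0; simp [idxFrom]
    | cons a tl ih =>
      intro s0
      rw [idxFrom, List.filter_cons]
      by_cases h : pyHeadA a = some 'B'
      · rw [if_pos h]
        have : (pyHeadA a == some 'B') = true := by simp [h]
        rw [this]
        simp [ih (s0 + 1)]
      · rw [if_neg h]
        have : (pyHeadA a == some 'B') = false := by simp [h]
        rw [this]
        simp [ih (s0 + 1)]
  rw [h2 actual 0]

-- B's program value in closed form
theorem alt_eq (predicted actual : List String) :
    sentence_metrics_alt predicted actual =
      [(if mB predicted actual (min predicted.length actual.length)
        then tpS predicted actual (min predicted.length actual.length)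
             + rbC actual (min predicted.length actual.length)
        else tpS predicted actual (min predicted.length actual.length)),
       ((sIdx actual).length : Int)] := by
  show [(if ((PySem.List.enumerate actual 0).foldl (bStep predicted) (0, 0, 0, false)).2.2.2
         then ((PySem.List.enumerate actual 0).foldl (bStep predicted) (0, 0, 0, false)).2.1
              + ((PySem.List.enumerate actual 0).foldl (bStep predicted) (0, 0, 0, false)).2.2.1
         else ((PySem.List.enumerate actual 0).foldl (bStep predicted) (0, 0, 0, false)).2.1),
        ((PySem.List.enumerate actual 0).foldl (bStep predicted) (0, 0, 0, false)).1] = _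
  have hcp : ((PySem.List.enumerate actual 0).foldl (bStep predicted) (0, 0, 0, false)).1
      = ((sIdx actual).length : Int) := by
    rw [cp_fold]
    rw [show ((0, 0, 0, false) : Int × Int × Int × Bool).1 = 0 from rfl, zero_add]
    rw [enum_filter_B actual 0, filter_B_eq_cp]
  have htail : ((PySem.List.enumerate actual 0).foldl (bStep predicted) (0, 0, 0, false)).2
      = (tpS predicted actual (min predicted.length actual.length),
         rbC actual (min predicted.length actual.length),
         mB predicted actual (min predicted.length actual.length)) := by
    rcases Nat.le_total actual.length predicted.length with hmn | hnm
    · rw [min_eq_right hmn]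
      have hfull : (PySem.List.enumerate actual 0).take actual.length
          = PySem.List.enumerate actual 0 := by
        apply List.take_of_length_le
        rw [PySem.List.length_enumerate]
      rw [← hfull, bInv predicted actual actual.length le_rfl hmn]
    · rw [min_eq_left hnm]
      have hsplit : PySem.List.enumerate actual 0
          = (PySem.List.enumerate actual 0).take predicted.length
            ++ (PySem.List.enumerate actual 0).drop predicted.length :=
        (List.take_append_drop _ _).symm
      conv_lhs => rw [hsplit]
      rw [List.foldl_append, bInv predicted actual predicted.length hnm le_rfl]
      apply tail_fold
      intro p hp
      have hdrop : (PySem.List.enumerate actual 0).drop predicted.length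
          = PySem.List.enumerate (actual.drop predicted.length) ((predicted.length : Int)) := by
        conv_lhs => rw [show actual = actual.take predicted.length ++ actual.drop predicted.length
          from (List.take_append_drop _ _).symm]
        rw [PySem.List.enumerate_append]
        have hlen : (PySem.List.enumerate (actual.take predicted.length) 0).length
            = predicted.length := by
          rw [PySem.List.length_enumerate, List.length_take]
          omega
        rw [List.drop_left' hlen]
        congr 1
        rw [List.length_take]
        push_cast
        omega
      rw [hdrop] at hp
      rw [PySem.List.mem_enumerate_iff] at hp
      rcases hp with ⟨j, hj, rfl⟩
      simp
  rw [hcp, htail]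

-- ===== VERDICT (by name: the statement is the Claim_ definition above) =====
theorem sentence_metrics_spec : Claim_unchanged_sentence_metrics := by
  intro predicted actual hdom hpre
  unfold Spec_sentence_metrics
  intro hnD
  unfold Pre_sentence_metrics at hpre
  obtain ⟨hp1, hp2, hp3, hp4⟩ := hpre
  rw [sentence_metrics_eq, alt_eq, A_tp_eq predicted actual hp3 hnD, TOT_eq predicted actual hp4]

theorem sentence_metrics_changed : Claim_changed_sentence_metrics := by
  unfold Claim_changed_sentence_metrics
  refine ⟨by decide, by decide, by decide, ?_, by decide, by decide⟩
  show sentence_metrics ["B-a"] ["B-a", "B-a"] = [2, 2]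
  simp [sentence_metrics, PySem.List.enumerate, aWhile, aFoundStep, pyHeadA, splitSecondA]
  decide

theorem sentence_metrics_tight : Claim_exact_sentence_metrics := by
  intro predicted actual hdom hpre hD
  obtain ⟨hp1, hp2, hp3, hp4⟩ := hpre
  unfold D_sentence_metrics at hD
  rw [Bool.and_eq_true, Bool.and_eq_true] at hD
  obtain ⟨⟨hany, hc2⟩, hfm⟩ := hD
  rcases anyB_elim predicted actual hany with ⟨x, hxm, hxn, hxB⟩
  have hnm : predicted.length ≤ actual.length := by omega
  obtain ⟨hsn, hsB', hmax⟩ := lastB_spec predicted actual hnm hc2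
  set s := lastB predicted actual with hsdef
  -- the threaded flag after the in-range starts is TRUE
  have hrr := rend_plus_one predicted actual hnm s hsn (Or.inl hsB') hmax
  have hflag : aFoundStep predicted actual (rE predicted actual s - 1) = true := by
    have hrw : rE predicted actual s - 1 = rend predicted actual s := by omega
    rw [hrw, aFoundStep_eq_fmAt]
    exact hfm
  -- s is the last in-range start
  have hsm : s < actual.length := by omega
  have hsin : s ∈ (sIdx actual).filter (fun t => decide (t < predicted.length)) := by
    rw [List.mem_filter]
    exact ⟨(mem_sIdx actual s).mpr ⟨hsm, hsB'⟩, by simpa using hsn⟩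
  have hlast : ((sIdx actual).filter (fun t => decide (t < predicted.length))).getLast? = some s := by
    apply max_last _ (List.Pairwise.filter _ (sIdx_sorted actual)) s hsin
    intro y hy
    have h1 := List.mem_filter.mp hy
    have h2 := (mem_sIdx actual y).mp h1.1
    have h3 : y < predicted.length := by simpa using h1.2
    by_contra hgt
    exact hmax y h3 (by omega) h2.2
  -- the out-of-range starts: a nonempty list, each adding one to tp
  have hxout : x ∈ (sIdx actual).filter (fun t => ! decide (t < predicted.length)) := by
    rw [List.mem_filter]
    exact ⟨(mem_sIdx actual x).mpr ⟨hxm, hxB⟩, by simp; omega⟩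
  have hout : ∀ t ∈ (sIdx actual).filter (fun t => ! decide (t < predicted.length)),
      ¬ aCont predicted actual t ∧ ¬ t < predicted.length := by
    intro t ht
    have h1 := List.mem_filter.mp ht
    have h3 : ¬ t < predicted.length := by simpa using h1.2
    exact ⟨fun hc => h3 hc.1, h3⟩
  have hin : ∀ t ∈ (sIdx actual).filter (fun t => decide (t < predicted.length)),
      aCont predicted actual t := by
    intro t ht
    have h1 := List.mem_filter.mp ht
    have h2 := (mem_sIdx actual t).mp h1.1
    have h3 : t < predicted.length := by simpa using h1.2
    refine (aCont_iff predicted actual t).mpr ⟨h3, ?_⟩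
    apply isBb_biP
    unfold isBb
    rw [h2.2]
    decide
  -- A's tp: sum over in-range starts plus one per out-of-range start
  have hAfold : ((sIdx actual).foldl (aStep predicted actual) (false, 0)).2
      = ((((sIdx actual).filter (fun t => decide (t < predicted.length))).map
            (cAt predicted actual)).sum)
        + (((sIdx actual).filter (fun t => ! decide (t < predicted.length))).length : Int) := by
    conv_lhs => rw [sorted_split predicted.length (sIdx actual) (sIdx_sorted actual)]
    rw [List.foldl_append, foldA_in predicted actual _ hin false 0, hlast]
    simp only [Option.map_some, Option.getD_some]
    rw [hflag, foldA_out_true predicted actual _ hout]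
    simp
  -- compare the first components
  intro hEq
  rw [sentence_metrics_eq, alt_eq] at hEq
  simp only [List.cons.injEq] at hEq
  obtain ⟨hfirst, -⟩ := hEq
  rw [hAfold, TOT_eq predicted actual hp4] at hfirst
  have hlen0 : (((sIdx actual).filter (fun t => ! decide (t < predicted.length))).length : Int) = 0 := by
    omega
  have : ((sIdx actual).filter (fun t => ! decide (t < predicted.length))).length = 0 := by
    exact_mod_cast hlen0
  rw [List.length_eq_zero_iff] at this
  rw [this] at hxout
  simp at hxout
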